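-- pv_equiv track=rewrite | github.com/Lehnurr/spe-ed-solver-prototype | python-visualizer/simulation/game/board.py | get_points_in_rectangle
-- ===== SOURCE A (Python) =====
-- def get_points_in_rectangle(x1, y1, x2, y2):
--     x_from = min(x1, x2)
--     x_to = max(x1, x2) + 1
--     y_from = min(y1, y2)
--     y_to = max(y1, y2) + 1
--
--     for x in range(x_from, x_to):
--         for y in range(y_from, y_to):
--             yield x, y
-- ===== SOURCE B (Python) =====
-- def get_points_in_rectangle(x1, y1, x2, y2):
--     lo_x, hi_x = min(x1, x2), max(x1, x2)
--     lo_y, hi_y = min(y1, y2), max(y1, y2)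
--     x, y = lo_x, lo_y
--     while x <= hi_x:
--         yield (x, y)
--         if y >= hi_y:
--             x, y = x + 1, lo_y
--         else:
--             y += 1
-- ===== Notes on version B (the rewrite author's own statement) =====
-- stated objective: alternative
-- what changed: Replaces the two nested for-loops by a single while-loop odometer: one (x, y) state pair is advanced point by point, y wrapping to lo_y and x stepping forward when a column is exhausted, emitting the same column-major order.
import Mathlib
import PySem

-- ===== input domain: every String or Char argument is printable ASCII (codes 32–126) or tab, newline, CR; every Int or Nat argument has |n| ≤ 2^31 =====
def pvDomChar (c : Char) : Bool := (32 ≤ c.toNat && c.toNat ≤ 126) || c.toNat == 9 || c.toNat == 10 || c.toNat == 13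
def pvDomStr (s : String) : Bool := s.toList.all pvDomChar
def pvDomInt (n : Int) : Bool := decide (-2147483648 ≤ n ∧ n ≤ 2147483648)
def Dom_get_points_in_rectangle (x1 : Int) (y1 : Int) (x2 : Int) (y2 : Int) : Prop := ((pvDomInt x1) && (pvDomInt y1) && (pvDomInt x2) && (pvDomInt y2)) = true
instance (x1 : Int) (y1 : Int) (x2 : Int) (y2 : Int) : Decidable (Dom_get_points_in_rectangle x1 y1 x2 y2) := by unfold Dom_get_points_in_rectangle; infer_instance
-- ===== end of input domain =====

-- B replaces A's nested for-loops by a single while-loop odometer over one (x, y)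
-- state pair (y wraps, x steps), emitting the same column-major order (alternative decomposition).


-- ===== PORT A =====
-- literal port: nested 'for x … for y … yield (x, y)' becomes flatMap over the outer
-- range of the map over the inner range.
def get_points_in_rectangle (x1 : Int) (y1 : Int) (x2 : Int) (y2 : Int) : List (Int × Int) :=
  let x_from := min x1 x2
  let x_to := max x1 x2 + 1
  let y_from := min y1 y2
  let y_to := max y1 y2 + 1
  (PySem.List.pyRange x_from x_to 1).flatMap
    (fun x => (PySem.List.pyRange y_from y_to 1).map (fun y => (x, y)))

-- ===== PORT B =====
-- literal port of Source B's while loop: one recursive step function over the (x, y)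
-- odometer state; terminates lexicographically (x advances on wrap, else y advances).
def gpWalk (hi_x lo_y hi_y : Int) (x y : Int) : List (Int × Int) :=
  if hx : x ≤ hi_x then
    (x, y) ::
      (if y ≥ hi_y then gpWalk hi_x lo_y hi_y (x + 1) lo_y
       else gpWalk hi_x lo_y hi_y x (y + 1))
  else []
termination_by ((hi_x + 1 - x).toNat, (hi_y - y).toNat)
decreasing_by
  · exact Prod.Lex.left _ _ (by omega)
  · exact Prod.Lex.right _ (by omega)

def get_points_in_rectangle_alt (x1 : Int) (y1 : Int) (x2 : Int) (y2 : Int) : List (Int × Int) :=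
  let lo_x := min x1 x2
  let hi_x := max x1 x2
  let lo_y := min y1 y2
  let hi_y := max y1 y2
  gpWalk hi_x lo_y hi_y lo_x lo_y

-- ===== PRECONDITION & SPEC =====
def Spec_get_points_in_rectangle (x1 : Int) (y1 : Int) (x2 : Int) (y2 : Int) (out : List (Int × Int)) : Prop := out = get_points_in_rectangle_alt x1 y1 x2 y2
instance (x1 : Int) (y1 : Int) (x2 : Int) (y2 : Int) (out : List (Int × Int)) : Decidable (Spec_get_points_in_rectangle x1 y1 x2 y2 out) := by unfold Spec_get_points_in_rectangle; infer_instance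

-- ===== CLAIM (what is proved, stated in full; the proofs are below) =====
def Claim_equal_get_points_in_rectangle : Prop := ∀ (x1 : Int) (y1 : Int) (x2 : Int) (y2 : Int), Dom_get_points_in_rectangle x1 y1 x2 y2 → Spec_get_points_in_rectangle x1 y1 x2 y2 (get_points_in_rectangle x1 y1 x2 y2)

-- ===== LEMMAS AND PROOFS =====

-- one column: from state (x, y) with y ≤ hi_y and x ≤ hi_x, the walk emits the rest
-- of column x and then continues from (x+1, lo_y)
lemma gpWalk_column (hi_x lo_y hi_y x y : Int) (hx : x ≤ hi_x) (hy : y ≤ hi_y) :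
    gpWalk hi_x lo_y hi_y x y
      = (PySem.List.pyRange y (hi_y + 1) 1).map (fun yy => (x, yy))
        ++ gpWalk hi_x lo_y hi_y (x + 1) lo_y := by
  generalize hk : (hi_y - y).toNat = k
  induction k generalizing y with
  | zero =>
    have hyy : y = hi_y := by omega
    rw [gpWalk]
    subst hyy
    simp [hx, PySem.List.pyRange_one_cons (by omega : y < y + 1),
      PySem.List.pyRange_one_eq_nil (by omega : (y:Int) + 1 ≤ y + 1)]
  | succ m ih =>
    have hlt : y < hi_y := by omega
    rw [gpWalk]
    simp only [hx, dif_pos, if_neg (by omega : ¬ y ≥ hi_y)]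
    rw [ih (y + 1) (by omega) (by omega),
      PySem.List.pyRange_one_cons (by omega : y < hi_y + 1)]
    simp

-- whole walk from (x, lo_y) with lo_y ≤ hi_y equals A's nested ranges from x on
lemma gpWalk_rows (hi_x lo_y hi_y x : Int) (hy : lo_y ≤ hi_y) :
    gpWalk hi_x lo_y hi_y x lo_y
      = (PySem.List.pyRange x (hi_x + 1) 1).flatMap
          (fun xx => (PySem.List.pyRange lo_y (hi_y + 1) 1).map (fun yy => (xx, yy))) := by
  generalize hk : (hi_x + 1 - x).toNat = k
  induction k generalizing x with
  | zero =>
    rw [gpWalk, dif_neg (by omega : ¬ x ≤ hi_x)]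
    rw [PySem.List.pyRange_one_eq_nil (by omega : hi_x + 1 ≤ x)]
    simp
  | succ m ih =>
    have hx : x ≤ hi_x := by omega
    rw [gpWalk_column hi_x lo_y hi_y x lo_y hx hy, ih (x + 1) (by omega),
      PySem.List.pyRange_one_cons (by omega : x < hi_x + 1)]
    simp

-- ===== VERDICT (by name: the statement is the Claim_ definition above) =====
theorem get_points_in_rectangle_spec : Claim_equal_get_points_in_rectangle := by
  intro x1 y1 x2 y2 _
  show get_points_in_rectangle x1 y1 x2 y2 = get_points_in_rectangle_alt x1 y1 x2 y2
  unfold get_points_in_rectangle get_points_in_rectangle_alt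
  rw [gpWalk_rows (max x1 x2) (min y1 y2) (max y1 y2) (min x1 x2) (by omega)]
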